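-- pv_equiv track=rewrite | github.com/warriorguo/ozx_image_atlas | backend/atlas_core.py | map_height
-- ===== SOURCE A (Python) =====
-- def check_if_took(map_dict, x, y):
--     """Check if a position in the tile map is occupied"""
--     return (x * 100 + y) in map_dict
--
-- def map_height(map_dict, width):
--     """Calculate the height of the tile map"""
--     for y in range(1000):
--         stop = True
--         for x in range(width):
--             if check_if_took(map_dict, x, y):
--                 stop = False
--         if stop:
--             return y
-- ===== SOURCE B (Python) =====
-- def map_height(map_dict, width):
--     """Calculate the height of the tile map"""
--     # Collect every row y in [0, 1000) covered by some key k = x*100 + y with 0 <= x < width.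
--     occupied = set()
--     for k in map_dict:
--         lo = max(0, -((999 - k) // 100))      # smallest x with k - 100*x <= 999
--         hi = min(width - 1, k // 100)         # largest x with k - 100*x >= 0
--         for x in range(lo, hi + 1):
--             occupied.add(k - 100 * x)
--     for y in range(1000):
--         if y not in occupied:
--             return y
-- ===== Notes on version B (the rewrite author's own statement) =====
-- stated objective: faster
-- what changed: Instead of probing all 1000*width grid cells against the dict, B indexes each dict key once to the at most 10 rows y in [0,1000) it can occupy for some column x in [0,width), then scans the 1000 rows once against that set.
import Mathlib
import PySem

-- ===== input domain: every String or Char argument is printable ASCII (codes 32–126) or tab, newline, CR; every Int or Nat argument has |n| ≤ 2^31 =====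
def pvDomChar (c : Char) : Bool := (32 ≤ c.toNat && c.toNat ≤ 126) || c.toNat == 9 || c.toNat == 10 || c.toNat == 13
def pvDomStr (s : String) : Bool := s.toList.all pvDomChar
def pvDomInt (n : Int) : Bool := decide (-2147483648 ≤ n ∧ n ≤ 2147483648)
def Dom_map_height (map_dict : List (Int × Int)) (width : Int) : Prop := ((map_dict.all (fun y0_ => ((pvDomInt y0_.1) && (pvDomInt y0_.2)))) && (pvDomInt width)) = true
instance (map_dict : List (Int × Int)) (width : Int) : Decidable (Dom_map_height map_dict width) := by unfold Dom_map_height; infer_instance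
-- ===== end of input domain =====

-- B replaces A's scan of all width*1000 grid cells by indexing each dict key to the ≤10 rows
-- it can occupy, then scanning the 1000 rows once against that set (objective: faster).

-- ===== PORT A =====
-- `(x * 100 + y) in map_dict` : dict key membership
def check_if_took (map_dict : List (Int × Int)) (x : Int) (y : Int) : Bool :=
  PySem.Dict.contains ⟨map_dict⟩ (x * 100 + y)

-- `for y in range(1000): …` with early return
def mhRowsA (map_dict : List (Int × Int)) (width : Int) : List Int → Option Int
  | [] => none
  | y :: ys =>
    let stop := (PySem.List.pyRange 0 width 1).foldl
      (fun stop x => if check_if_took map_dict x y then false else stop) true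
    if stop then some y else mhRowsA map_dict width ys

def map_height (map_dict : List (Int × Int)) (width : Int) : Option Int :=
  mhRowsA map_dict width (PySem.List.pyRange 0 1000 1)

-- ===== PORT B =====
-- build `occupied`: for k in map_dict: for x in range(lo, hi+1): occupied.add(k - 100*x)
def mhOccupied (map_dict : List (Int × Int)) (width : Int) : PySem.Set Int :=
  map_dict.foldl (fun s kv =>
    (PySem.List.pyRange (max 0 (-(PySem.Int.floordiv (999 - kv.1) 100)))
        (min (width - 1) (PySem.Int.floordiv kv.1 100) + 1) 1).foldl
      (fun s x => PySem.Set.add s (kv.1 - 100 * x)) s)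
    PySem.Set.empty

-- `for y in range(1000): if y not in occupied: return y`
def mhScanB (occupied : PySem.Set Int) : List Int → Option Int
  | [] => none
  | y :: ys => if PySem.Set.contains occupied y then mhScanB occupied ys else some y

def map_height_alt (map_dict : List (Int × Int)) (width : Int) : Option Int :=
  mhScanB (mhOccupied map_dict width) (PySem.List.pyRange 0 1000 1)

-- ===== PRECONDITION & SPEC =====
def Spec_map_height (map_dict : List (Int × Int)) (width : Int) (out : Option Int) : Prop := out = map_height_alt map_dict width
instance (map_dict : List (Int × Int)) (width : Int) (out : Option Int) : Decidable (Spec_map_height map_dict width out) := by unfold Spec_map_height; infer_instance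

-- ===== CLAIM (what is proved, stated in full; the proofs are below) =====
def Claim_equal_map_height : Prop := ∀ (map_dict : List (Int × Int)) (width : Int), Dom_map_height map_dict width → Spec_map_height map_dict width (map_height map_dict width)

-- ===== LEMMAS AND PROOFS =====

-- A's inner loop computes "no x in [0,width) hits row y"
theorem foldl_if_false (c : Int → Bool) (xs : List Int) (b : Bool) :
    xs.foldl (fun st x => if c x then false else st) b = (b && xs.all (fun x => !c x)) := by
  induction xs generalizing b with
  | nil => simp
  | cons x xs ih =>
    simp only [List.foldl_cons, List.all_cons, ih]
    cases h : c x
    · simp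
    · simp [h]

-- membership in B's occupied set
theorem mem_mhOccupied_aux (y : Int) (d : List (Int × Int)) (w : Int) (s : PySem.Set Int) :
    y ∈ d.foldl (fun s kv =>
        (PySem.List.pyRange (max 0 (-(PySem.Int.floordiv (999 - kv.1) 100)))
            (min (w - 1) (PySem.Int.floordiv kv.1 100) + 1) 1).foldl
          (fun s x => PySem.Set.add s (kv.1 - 100 * x)) s) s
    ↔ y ∈ s ∨ ∃ kv ∈ d, ∃ x ∈ PySem.List.pyRange (max 0 (-(PySem.Int.floordiv (999 - kv.1) 100)))
            (min (w - 1) (PySem.Int.floordiv kv.1 100) + 1) 1, y = kv.1 - 100 * x := by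
  induction d generalizing s with
  | nil => simp
  | cons kv d ih =>
    simp only [List.foldl_cons, ih, PySem.Set.mem_foldl_add, List.mem_cons]
    constructor
    · rintro ((h | ⟨x, hx, rfl⟩) | ⟨p, hp, x, hx, rfl⟩)
      · exact Or.inl h
      · exact Or.inr ⟨kv, Or.inl rfl, x, hx, rfl⟩
      · exact Or.inr ⟨p, Or.inr hp, x, hx, rfl⟩
    · rintro (h | ⟨p, (rfl | hp), x, hx, rfl⟩)
      · exact Or.inl (Or.inl h)
      · exact Or.inl (Or.inr ⟨x, hx, rfl⟩)
      · exact Or.inr ⟨p, hp, x, hx, rfl⟩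

-- row y (0 ≤ y < 1000) is in B's occupied set iff some column of A's scan hits it
theorem mem_mhOccupied_iff (d : List (Int × Int)) (w y : Int) (hy0 : 0 ≤ y) (hy1 : y < 1000) :
    y ∈ mhOccupied d w ↔ ∃ x, 0 ≤ x ∧ x < w ∧ check_if_took d x y = true := by
  unfold mhOccupied
  rw [mem_mhOccupied_aux]
  simp only [PySem.Set.empty, List.not_mem_nil, false_or, PySem.List.mem_pyRange_one,
    check_if_took, PySem.Dict.contains_iff_mem_keys, PySem.Dict.keys_mk, List.mem_map,
    PySem.Int.floordiv_eq_ediv_of_pos (by norm_num : (0:Int) < 100)]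
  constructor
  · rintro ⟨kv, hkv, x, ⟨hlo, hhi⟩, rfl⟩
    refine ⟨x, by omega, by omega, ⟨kv, hkv, by omega⟩⟩
  · rintro ⟨x, hx0, hxw, kv, hkv, hk⟩
    exact ⟨kv, hkv, x, ⟨by omega, by omega⟩, by omega⟩

-- the two row loops agree on any list of rows inside [0, 1000)
theorem rows_eq (d : List (Int × Int)) (w : Int) (ys : List Int)
    (h : ∀ y ∈ ys, 0 ≤ y ∧ y < 1000) :
    mhRowsA d w ys = mhScanB (mhOccupied d w) ys := by
  induction ys with
  | nil => rfl
  | cons y ys ih =>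
    have hy := h y (List.mem_cons_self ..)
    have hocc : y ∈ mhOccupied d w ↔
        ∃ x, 0 ≤ x ∧ x < w ∧ check_if_took d x y = true :=
      mem_mhOccupied_iff d w y hy.1 hy.2
    have hstop : ((PySem.List.pyRange 0 w 1).foldl
        (fun stop x => if check_if_took d x y then false else stop) true)
        = !(PySem.Set.contains (mhOccupied d w) y) := by
      rw [foldl_if_false]
      by_cases hm : y ∈ mhOccupied d w
      · obtain ⟨x, hx0, hxw, hcx⟩ := hocc.mp hm
        rw [(PySem.Set.contains_iff _ _).mpr hm]
        simp only [Bool.true_and, Bool.not_true, List.all_eq_false]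
        exact ⟨x, by rw [PySem.List.mem_pyRange_one]; omega, by simp [hcx]⟩
      · have hc : PySem.Set.contains (mhOccupied d w) y = false := by
          cases hcv : PySem.Set.contains (mhOccupied d w) y
          · rfl
          · exact absurd ((PySem.Set.contains_iff _ _).mp hcv) hm
        rw [hc]
        simp only [Bool.true_and, Bool.not_false, List.all_eq_true]
        intro x hx
        rw [PySem.List.mem_pyRange_one] at hx
        by_contra hcx
        exact hm (hocc.mpr ⟨x, hx.1, hx.2, by simpa using hcx⟩)
    simp only [mhRowsA, mhScanB, hstop]
    cases hc : PySem.Set.contains (mhOccupied d w) y <;>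
      simp [ih (fun z hz => h z (List.mem_cons_of_mem _ hz))]

-- ===== VERDICT (by name: the statement is the Claim_ definition above) =====
theorem map_height_spec : Claim_equal_map_height := by
  intro d w _
  unfold Spec_map_height map_height map_height_alt
  exact rows_eq d w _ (fun y hy => by
    rw [PySem.List.mem_pyRange_one] at hy; exact ⟨hy.1, hy.2⟩)
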